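-- pv_equiv track=rewrite | github.com/gridvisi/Python_workspace | Zero 2 Hero Class/Math/Math_basic/7 kyu Math engine.py | math_engine
-- ===== SOURCE A (Python) =====
-- def math_engine(arr):
--     a= 1
--     b = 0
--     if arr is None:
--         return 0
--     for i in range(len(arr)):
--         if arr[i] >= 0:
--             a *= arr[i]
--         else:
--             b += arr[i]
--     return a+b
-- ===== SOURCE B (Python) =====
-- def math_engine(arr):
--     if arr is None:
--         return 0
--     s = sorted(arr)
--     # in the sorted array all negatives form a prefix; find its end
--     k = 0
--     while k < len(s) and s[k] < 0:
--         k += 1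
--     neg_sum = sum(s[:k])
--     p = 1
--     for x in s[k:]:
--         p *= x
--     return neg_sum + p
-- ===== Notes on version B (the rewrite author's own statement) =====
-- stated objective: alternative
-- what changed: Sorts the array first so the negatives form a contiguous prefix, locates the partition point with a scan, then sums the prefix slice and multiplies the suffix slice, instead of A's single index loop with two branching accumulators.
import Mathlib
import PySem

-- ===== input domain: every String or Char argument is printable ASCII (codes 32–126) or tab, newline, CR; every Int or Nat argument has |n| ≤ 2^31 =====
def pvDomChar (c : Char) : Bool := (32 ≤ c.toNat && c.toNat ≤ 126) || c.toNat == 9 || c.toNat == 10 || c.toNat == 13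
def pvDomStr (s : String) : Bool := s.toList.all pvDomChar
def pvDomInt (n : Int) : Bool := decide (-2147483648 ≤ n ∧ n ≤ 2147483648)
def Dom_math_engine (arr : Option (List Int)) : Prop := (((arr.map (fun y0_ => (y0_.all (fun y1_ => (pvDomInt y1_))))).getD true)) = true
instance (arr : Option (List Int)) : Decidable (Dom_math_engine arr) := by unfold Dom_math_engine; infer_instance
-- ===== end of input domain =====

-- B sorts first so negatives form a prefix, then sums that prefix slice and multiplies the suffix slice
-- (alternative decomposition, not claimed faster).

-- ===== PORT A =====
def math_engine (arr : Option (List Int)) : Int :=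
  match arr with
  | none => 0
  | some l =>
    let st := (PySem.List.pyRange 0 l.length 1).foldl
      (fun (ab : Int × Int) i =>
        if PySem.List.pyGetD l i 0 ≥ 0 then (ab.1 * PySem.List.pyGetD l i 0, ab.2)
        else (ab.1, ab.2 + PySem.List.pyGetD l i 0)) (1, 0)
    st.1 + st.2

-- ===== PORT B =====
-- the while loop 'k = 0; while k < len(s) and s[k] < 0: k += 1' as structural recursion over s
def pvNegPrefixLen (s : List Int) : Nat :=
  match s with
  | [] => 0
  | x :: t => if x < 0 then pvNegPrefixLen t + 1 else 0

def math_engine_alt (arr : Option (List Int)) : Int :=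
  match arr with
  | none => 0
  | some l =>
    let s := PySem.List.sorted l (fun x => x) false
    let k := pvNegPrefixLen s
    let negSum := (PySem.List.slice s none (some (k : Int))).sum
    let p := (PySem.List.slice s (some (k : Int)) none).foldl (fun p x => p * x) 1
    negSum + p

-- ===== PRECONDITION & SPEC =====
def Spec_math_engine (arr : Option (List Int)) (out : Int) : Prop := out = math_engine_alt arr
instance (arr : Option (List Int)) (out : Int) : Decidable (Spec_math_engine arr out) := by unfold Spec_math_engine; infer_instance

-- ===== CLAIM (what is proved, stated in full; the proofs are below) =====
def Claim_equal_math_engine : Prop := ∀ (arr : Option (List Int)), Dom_math_engine arr → Spec_math_engine arr (math_engine arr)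

-- ===== LEMMAS AND PROOFS =====
-- A's fold computes (product of nonnegatives, sum of negatives)
lemma pv_fold_eq (l : List Int) : ∀ (a b : Int),
    (l.foldl (fun (ab : Int × Int) x =>
        if x ≥ 0 then (ab.1 * x, ab.2) else (ab.1, ab.2 + x)) (a, b))
      = (a * (l.filter (fun x => decide (x ≥ 0))).prod,
         b + (l.filter (fun x => decide (x < 0))).sum) := by
  induction l with
  | nil => intro a b; simp
  | cons x xs ih =>
    intro a b
    by_cases hx : x ≥ 0
    · have hx' : ¬ x < 0 := by omega
      simp [List.foldl, hx, hx', ih]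
      ring
    · have hx' : x < 0 := by omega
      simp [List.foldl, hx, hx', ih]
      ring

-- on a sorted list, the negative prefix is exactly the negatives, the rest the nonnegatives
lemma pv_take_negPrefix (s : List Int) (hs : s.Pairwise (· ≤ ·)) :
    s.take (pvNegPrefixLen s) = s.filter (fun x => decide (x < 0)) ∧
    s.drop (pvNegPrefixLen s) = s.filter (fun x => decide (x ≥ 0)) := by
  induction s with
  | nil => simp [pvNegPrefixLen]
  | cons x t ih =>
    rcases List.pairwise_cons.mp hs with ⟨hx, ht⟩
    rcases ih ht with ⟨ih1, ih2⟩
    by_cases h : x < 0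
    · have h' : ¬ x ≥ 0 := by omega
      simp [pvNegPrefixLen, h, h', ih1, ih2]
    · have h' : x ≥ 0 := by omega
      have hall : ∀ y ∈ t, ¬ (y < 0) := fun y hy => by have := hx y hy; omega
      have hneg : t.filter (fun x => decide (x < 0)) = [] :=
        List.filter_eq_nil_iff.mpr (by intro y hy; simpa using hall y hy)
      have hpos : t.filter (fun x => decide (x ≥ 0)) = t :=
        List.filter_eq_self.mpr (by intro y hy; have := hx y hy; simp; omega)
      simp [pvNegPrefixLen, h, h', hneg, hpos]

-- ===== VERDICT (by name: the statement is the Claim_ definition above) =====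
theorem math_engine_spec : Claim_equal_math_engine := by
  intro arr _
  unfold Spec_math_engine math_engine math_engine_alt
  cases arr with
  | none => rfl
  | some l =>
    simp only []
    rw [PySem.List.foldl_pyRange_zero_pyGetD' l 0
      (fun (ab : Int × Int) x => if x ≥ 0 then (ab.1 * x, ab.2) else (ab.1, ab.2 + x)) (1, 0)]
    rw [pv_fold_eq l 1 0]
    set s := PySem.List.sorted l (fun x => x) false with hsdef
    have hperm : s.Perm l := PySem.List.sorted_perm l (fun x => x) false
    have hpw : s.Pairwise (· ≤ ·) := by
      simpa using PySem.List.sorted_pairwise l (fun x => x)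
    rcases pv_take_negPrefix s hpw with ⟨h1, h2⟩
    have hk : (pvNegPrefixLen s : Int) = ((pvNegPrefixLen s : Nat) : Int) := rfl
    rw [PySem.List.slice_to_natCast, PySem.List.slice_from_natCast, h1, h2]
    have hpermf1 : (s.filter (fun x => decide (x < 0))).Perm (l.filter (fun x => decide (x < 0))) :=
      hperm.filter _
    have hpermf2 : (s.filter (fun x => decide (x ≥ 0))).Perm (l.filter (fun x => decide (x ≥ 0))) :=
      hperm.filter _
    rw [← List.prod_eq_foldl, hpermf1.sum_eq, hpermf2.prod_eq]
    ring
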